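-- pv_equiv track=rewrite | github.com/idhaes/A-D---code | dubbels.py | dubbels
-- ===== SOURCE A (Python) =====
-- def tel(lst):
--     teller = {}
--     for getal in lst:
--         if getal in teller:
--             teller[getal] += 1
--         else:
--             teller[getal] = 1
--     return teller
--
-- def dubbels(lst):
--     teller = tel(lst)
--     enkel= set()
--     meerdere = set()
--     for getal, aantal in teller.items():
--         if aantal == 1:
--             enkel.add(getal)
--         else:
--             meerdere.add(getal)
--     return enkel, meerdere
-- ===== SOURCE B (Python) =====
-- def dubbels(lst):
--     seen = set()
--     dup = set()
--     for x in lst: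
--         if x in seen:
--             dup.add(x)
--         else:
--             seen.add(x)
--     return seen - dup, seen & dup
-- ===== Notes on version B (the rewrite author's own statement) =====
-- stated objective: simpler
-- what changed: Drops the tel frequency dict and the count-then-partition two-pass structure for a single pass over lst maintaining seen/dup sets, returning seen - dup and seen & dup.
import Mathlib
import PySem

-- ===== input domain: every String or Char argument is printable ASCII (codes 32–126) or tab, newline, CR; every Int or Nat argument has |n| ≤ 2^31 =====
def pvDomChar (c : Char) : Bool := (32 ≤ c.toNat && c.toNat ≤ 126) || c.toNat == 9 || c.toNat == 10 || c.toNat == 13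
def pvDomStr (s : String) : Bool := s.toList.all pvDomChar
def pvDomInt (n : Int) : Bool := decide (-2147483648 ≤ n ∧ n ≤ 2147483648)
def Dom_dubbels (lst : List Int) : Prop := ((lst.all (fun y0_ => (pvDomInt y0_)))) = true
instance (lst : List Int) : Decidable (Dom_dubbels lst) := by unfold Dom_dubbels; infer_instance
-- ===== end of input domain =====

-- B drops A's tel frequency dict and count-then-partition passes: one pass over lst
-- maintaining seen/dup sets, returning (seen - dup, seen & dup). Same cost; simpler.


-- ===== PORT A =====
def tel (lst : List Int) : PySem.Dict Int Int :=
  lst.foldl (fun teller getal =>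
    if teller.contains getal then teller.insert getal (teller.getD getal 0 + 1)
    else teller.insert getal 1) PySem.Dict.empty

def dubbels (lst : List Int) : List Int × List Int :=
  (tel lst).items.foldl (fun (p : List Int × List Int) kv =>
      if kv.2 == 1 then (PySem.Set.add p.1 kv.1, p.2)
      else (p.1, PySem.Set.add p.2 kv.1))
    (PySem.Set.empty, PySem.Set.empty)

-- ===== PORT B =====
def dubbels_alt (lst : List Int) : List Int × List Int :=
  let sd := lst.foldl (fun (p : List Int × List Int) x =>
      if PySem.Set.contains p.1 x then (p.1, PySem.Set.add p.2 x)
      else (PySem.Set.add p.1 x, p.2))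
    (PySem.Set.empty, PySem.Set.empty)
  (PySem.Set.diff sd.1 sd.2, PySem.Set.inter sd.1 sd.2)

-- ===== PRECONDITION & SPEC =====
def Spec_dubbels (lst : List Int) (out : List Int × List Int) : Prop := out = dubbels_alt lst
instance (lst : List Int) (out : List Int × List Int) : Decidable (Spec_dubbels lst out) := by unfold Spec_dubbels; infer_instance

-- ===== CLAIM (what is proved, stated in full; the proofs are below) =====
def Claim_equal_dubbels : Prop := ∀ (lst : List Int), Dom_dubbels lst → Spec_dubbels lst (dubbels lst)

-- ===== LEMMAS AND PROOFS =====

-- A's counting loop is Counter(lst): both branches insert getD+1.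
theorem tel_eq_counter (lst : List Int) : tel lst = PySem.Dict.counter lst := by
  have hstep : (fun (teller : PySem.Dict Int Int) getal =>
      if teller.contains getal then teller.insert getal (teller.getD getal 0 + 1)
      else teller.insert getal 1)
      = (fun (d : PySem.Dict Int Int) x => d.insert x (d.getD x 0 + 1)) := by
    funext d x
    cases hc : d.contains x with
    | true => simp
    | false => simp [PySem.Dict.getD_of_not_contains d 0 hc]
  rw [tel, hstep, PySem.Dict.foldl_insert_getD_add_one_eq_counter]

-- A's partition loop over distinct keys appends the filtered keys to both accumulators.
theorem partition_foldl (p : Int → Bool) :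
    ∀ (l : List Int) (e m : List Int), l.Nodup → (∀ x ∈ e, x ∉ l) → (∀ x ∈ m, x ∉ l) →
    l.foldl (fun (acc : List Int × List Int) k =>
        if p k then (PySem.Set.add acc.1 k, acc.2) else (acc.1, PySem.Set.add acc.2 k)) (e, m)
      = (e ++ l.filter p, m ++ l.filter (fun k => !p k)) := by
  intro l
  induction l with
  | nil => intro e m _ _ _; simp
  | cons a t ih =>
    intro e m hnd he hm
    have hat : a ∉ t := (List.nodup_cons.mp hnd).1
    have hae : a ∉ e := fun h => he a h (List.mem_cons_self ..)
    have ham : a ∉ m := fun h => hm a h (List.mem_cons_self ..)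
    rw [List.foldl_cons]
    by_cases hp : p a = true
    · rw [if_pos hp, PySem.Set.add_of_not_mem hae,
        ih (e ++ [a]) m (List.nodup_cons.mp hnd).2
          (by intro x hx; rcases List.mem_append.mp hx with h | h
              · exact fun ht => he x h (List.mem_cons_of_mem _ ht)
              · simp at h; subst h; exact hat)
          (fun x hx ht => hm x hx (List.mem_cons_of_mem _ ht))]
      simp [hp]
    · rw [if_neg hp, PySem.Set.add_of_not_mem ham,
        ih e (m ++ [a]) (List.nodup_cons.mp hnd).2
          (fun x hx ht => he x hx (List.mem_cons_of_mem _ ht))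
          (by intro x hx; rcases List.mem_append.mp hx with h | h
              · exact fun ht => hm x h (List.mem_cons_of_mem _ ht)
              · simp at h; subst h; exact hat)]
      simp only [Bool.not_eq_true] at hp
      simp [hp]

-- A's value: filters of the distinct values of lst by count = 1.
theorem dubbels_eq_filters (lst : List Int) :
    dubbels lst = ((PySem.Set.ofList lst).filter (fun k => ((lst.count k : Int) == 1)),
                   (PySem.Set.ofList lst).filter (fun k => !((lst.count k : Int) == 1))) := by
  rw [dubbels, tel_eq_counter, PySem.Dict.items_counter, List.foldl_map]
  have := partition_foldl (fun k => ((lst.count k : Int) == 1)) (PySem.Set.ofList lst) [] []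
    (PySem.Set.nodup_ofList lst) (by simp) (by simp)
  simpa using this

-- B's loop invariant: first component collects the distinct values, second exactly the repeated ones.
theorem bfold_spec :
    ∀ (t : List Int) (seen dup : List Int),
    (t.foldl (fun (p : List Int × List Int) x =>
        if PySem.Set.contains p.1 x then (p.1, PySem.Set.add p.2 x)
        else (PySem.Set.add p.1 x, p.2)) (seen, dup)).1 = PySem.Set.update seen t ∧
    (∀ y, y ∈ (t.foldl (fun (p : List Int × List Int) x =>
        if PySem.Set.contains p.1 x then (p.1, PySem.Set.add p.2 x)
        else (PySem.Set.add p.1 x, p.2)) (seen, dup)).2 ↔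
      y ∈ dup ∨ (y ∈ seen ∧ y ∈ t) ∨ 2 ≤ t.count y) := by
  intro t
  induction t with
  | nil => intro seen dup; simp [PySem.Set.update_nil]
  | cons a t ih =>
    intro seen dup
    cases hc : PySem.Set.contains seen a with
    | true =>
      have h : a ∈ seen := (PySem.Set.contains_iff seen a).mp hc
      simp only [List.foldl_cons, hc, reduceIte]
      obtain ⟨h1, h2⟩ := ih seen (PySem.Set.add dup a)
      refine ⟨by rw [h1, PySem.Set.update_cons, PySem.Set.add_of_mem h], ?_⟩
      intro y
      rw [h2 y, PySem.Set.mem_add]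
      by_cases hy : y = a
      · subst hy; simp [h]
      · have hy' : ¬ a = y := fun hh => hy hh.symm
        simp [hy, hy', List.mem_cons]
    | false =>
      have h : a ∉ seen := fun hm => by
        rw [(PySem.Set.contains_iff seen a).mpr hm] at hc; cases hc
      simp only [List.foldl_cons, hc, Bool.false_eq_true, reduceIte]
      obtain ⟨h1, h2⟩ := ih (PySem.Set.add seen a) dup
      refine ⟨by rw [h1, PySem.Set.update_cons], ?_⟩
      intro y
      rw [h2 y, PySem.Set.mem_add]
      by_cases hy : y = a
      · subst hy
        constructor
        · rintro (hd | (⟨_, hyt⟩ | hcnt))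
          · exact Or.inl hd
          · have h1c : 1 ≤ t.count y := List.one_le_count_iff.mpr hyt
            right; right; rw [List.count_cons_self]; omega
          · right; right; rw [List.count_cons_self]; omega
        · rintro (hd | (⟨hs, _⟩ | hcnt))
          · exact Or.inl hd
          · exact absurd hs h
          · rw [List.count_cons_self] at hcnt
            have h1c : 1 ≤ t.count y := by omega
            right; left
            exact ⟨Or.inr rfl, List.one_le_count_iff.mp h1c⟩
      · have hy' : ¬ a = y := fun hh => hy hh.symm
        simp [hy, hy', List.mem_cons]

-- ===== VERDICT (by name: the statement is the Claim_ definition above) =====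
theorem dubbels_spec : Claim_equal_dubbels := by
  intro lst _
  unfold Spec_dubbels
  obtain ⟨h1, h2⟩ := bfold_spec lst [] []
  set r := lst.foldl (fun (p : List Int × List Int) x =>
      if PySem.Set.contains p.1 x then (p.1, PySem.Set.add p.2 x)
      else (PySem.Set.add p.1 x, p.2)) (([] : List Int), ([] : List Int)) with hr
  simp only [List.not_mem_nil, false_and, false_or] at h2
  have hseen : r.1 = PySem.Set.ofList lst := by
    rw [h1]; exact PySem.Set.update_nil_left lst
  have hdiff : PySem.Set.diff r.1 r.2
      = (PySem.Set.ofList lst).filter (fun k => ((lst.count k : Int) == 1)) := by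
    show r.1.filter (fun x => !PySem.Set.contains r.2 x) = _
    rw [hseen]
    apply List.filter_congr
    intro x hx
    have hx1 : 1 ≤ lst.count x := List.one_le_count_iff.mpr ((PySem.Set.mem_ofList lst x).mp hx)
    by_cases h2c : 2 ≤ lst.count x
    · rw [(PySem.Set.contains_iff r.2 x).mpr ((h2 x).mpr h2c)]
      have : ¬ ((lst.count x : Int) = 1) := by omega
      simp [this]
    · have hnm : x ∉ r.2 := fun hm => h2c ((h2 x).mp hm)
      have hcf : PySem.Set.contains r.2 x = false := by
        cases hcv : PySem.Set.contains r.2 x with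
        | false => rfl
        | true => exact absurd ((PySem.Set.contains_iff r.2 x).mp hcv) hnm
      rw [hcf]
      have : (lst.count x : Int) = 1 := by omega
      simp [this]
  have hinter : PySem.Set.inter r.1 r.2
      = (PySem.Set.ofList lst).filter (fun k => !((lst.count k : Int) == 1)) := by
    show r.1.filter (fun x => PySem.Set.contains r.2 x) = _
    rw [hseen]
    apply List.filter_congr
    intro x hx
    have hx1 : 1 ≤ lst.count x := List.one_le_count_iff.mpr ((PySem.Set.mem_ofList lst x).mp hx)
    by_cases h2c : 2 ≤ lst.count x
    · rw [(PySem.Set.contains_iff r.2 x).mpr ((h2 x).mpr h2c)]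
      have : ¬ ((lst.count x : Int) = 1) := by omega
      simp [this]
    · have hnm : x ∉ r.2 := fun hm => h2c ((h2 x).mp hm)
      have hcf : PySem.Set.contains r.2 x = false := by
        cases hcv : PySem.Set.contains r.2 x with
        | false => rfl
        | true => exact absurd ((PySem.Set.contains_iff r.2 x).mp hcv) hnm
      rw [hcf]
      have : (lst.count x : Int) = 1 := by omega
      simp [this]
  show dubbels lst = (PySem.Set.diff r.1 r.2, PySem.Set.inter r.1 r.2)
  rw [dubbels_eq_filters, hdiff, hinter]
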